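-- pv_equiv track=rewrite | github.com/koba925/alds | atcoder/AGC040/A.py | solve
-- ===== SOURCE A (Python) =====
-- def solve(S):
--     N = len(S) + 1
--     a = [0] * N
--     for i in range(1, N):
--         if S[i - 1] == "<":
--             a[i] = a[i - 1] + 1
--     for i in reversed(range(N - 1)):
--         if S[i] == ">":
--             a[i] = max(a[i], a[i + 1] + 1)
--     return sum(a)
-- ===== SOURCE B (Python) =====
-- def solve(S):
--     # run-length decomposition: each '<'-run of length l contributes l*(l+1)//2,
--     # each '>'-run r*(r+1)//2, minus min(l, r) at each '<'-run immediately
--     # followed by a '>'-run (the shared peak is counted once, as the max).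
--     total = 0
--     i, n = 0, len(S)
--     prev = None  # previous run as (char, length)
--     while i < n:
--         c = S[i]
--         j = i
--         while j < n and S[j] == c:
--             j += 1
--         l = j - i
--         if c == '<':
--             total += l * (l + 1) // 2
--         elif c == '>':
--             total += l * (l + 1) // 2
--             if prev is not None and prev[0] == '<':
--                 total -= min(prev[1], l)
--         prev = (c, l)
--         i = j
--     return total
-- ===== Notes on version B (the rewrite author's own statement) =====
-- stated objective: alternative
-- what changed: replaces the two array passes (left-to-right '<' counting, right-to-left '>' max pass, then summing the array) with a single run-length scan that sums closed-form triangular numbers per run and subtracts min(l,r) at each '<'-run/'>'-run peak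
import Mathlib
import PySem

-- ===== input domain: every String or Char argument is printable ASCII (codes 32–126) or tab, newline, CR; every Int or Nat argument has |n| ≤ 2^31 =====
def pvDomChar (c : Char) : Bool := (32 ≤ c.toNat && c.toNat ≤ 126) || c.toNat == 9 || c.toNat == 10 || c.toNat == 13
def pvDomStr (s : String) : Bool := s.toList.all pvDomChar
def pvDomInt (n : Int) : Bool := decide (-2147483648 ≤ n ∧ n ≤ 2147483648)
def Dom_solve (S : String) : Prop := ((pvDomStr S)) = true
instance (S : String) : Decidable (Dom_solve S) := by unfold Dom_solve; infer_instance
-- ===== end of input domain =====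

-- B replaces A's two array passes by a single run-length scan with closed-form
-- triangular sums per run and a min(l,r) correction at each '<'/'>' peak (alternative, same cost).

-- ===== PORT A =====
-- literal port of A: a = [0]*(len(S)+1); left-to-right '<' pass; reversed '>' max pass; sum(a).
-- (all list indices are always in range, so the total forms pySetD/pyGetD are exact)
def solve (S : String) : Int :=
  let s := S.toList
  let N : Int := (s.length : Int) + 1
  let a0 : List Int := List.replicate (s.length + 1) 0
  let a1 := (PySem.List.pyRange 1 N 1).foldl
    (fun a i =>
      if PySem.List.pyGet? s (i - 1) = some '<' then
        PySem.List.pySetD a i (PySem.List.pyGetD a (i - 1) 0 + 1)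
      else a) a0
  let a2 := ((PySem.List.pyRange 0 (N - 1) 1).reverse).foldl
    (fun a i =>
      if PySem.List.pyGet? s i = some '>' then
        PySem.List.pySetD a i (max (PySem.List.pyGetD a i 0) (PySem.List.pyGetD a (i + 1) 0 + 1))
      else a) a1
  a2.sum

-- ===== PORT B =====
-- outer while of Source B = recursion peeling one maximal run; inner while = takeWhile/dropWhile
def solveRuns : Option (Char × Int) → Int → List Char → Int
  | _, total, [] => total
  | prev, total, c :: t =>
    let l : Int := ((t.takeWhile (fun x => x = c)).length : Int) + 1
    let rest := t.dropWhile (fun x => x = c)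
    let total' :=
      if c = '<' then total + PySem.Int.floordiv (l * (l + 1)) 2
      else if c = '>' then
        total + PySem.Int.floordiv (l * (l + 1)) 2 -
          (match prev with
           | some (pc, pl) => if pc = '<' then min pl l else 0
           | none => 0)
      else total
    solveRuns (some (c, l)) total' rest
  termination_by _ _ r => r.length
  decreasing_by
    simp only [List.length_cons]
    exact Nat.lt_succ_of_le (List.length_dropWhile_le _ _)

def solve_alt (S : String) : Int := solveRuns none 0 S.toList

-- ===== PRECONDITION & SPEC =====
def Spec_solve (S : String) (out : Int) : Prop := out = solve_alt S
instance (S : String) (out : Int) : Decidable (Spec_solve S out) := by unfold Spec_solve; infer_instance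

-- ===== CLAIM (what is proved, stated in full; the proofs are below) =====
def Claim_equal_solve : Prop := ∀ (S : String), Dom_solve S → Spec_solve S (solve S)

-- ===== LEMMAS AND PROOFS =====

-- length of the leading '>' run
def Gf : List Char → Int
  | [] => 0
  | c :: t => if c = '>' then Gf t + 1 else 0

-- the value of A's final array, summed from the left with acc = current '<'-chain length
def Uf : Int → List Char → Int
  | a, [] => max a 0
  | a, c :: t => max a (Gf (c :: t)) + Uf (if c = '<' then a + 1 else 0) t

-- '<'-chain length ending at position i, seeded with a
def Lg (a : Int) (s : List Char) : Nat → Int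
  | 0 => a
  | i + 1 => if s.getD i ' ' = '<' then Lg a s i + 1 else 0

-- A's final array value at position i
def valF (s : List Char) (i : Nat) : Int := max (Lg 0 s i) (Gf (s.drop i))

def Tri : Nat → Int
  | 0 => 0
  | k + 1 => Tri k + ((k : Int) + 1)

lemma Gf_nonneg (r : List Char) : 0 ≤ Gf r := by
  induction r with
  | nil => simp [Gf]
  | cons c t ih => simp only [Gf]; split <;> omega

lemma Gf_eq_zero_of_head (r : List Char) (h : r.head? ≠ some '>') : Gf r = 0 := by
  cases r with
  | nil => rfl
  | cons c t =>
    simp only [List.head?] at h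
    have hc : c ≠ '>' := fun hc => h (by rw [hc])
    simp [Gf, hc]

lemma Lg_nonneg (a : Int) (s : List Char) (i : Nat) (ha : 0 ≤ a) : 0 ≤ Lg a s i := by
  induction i with
  | zero => simpa [Lg]
  | succ i ih => simp only [Lg]; split <;> omega

lemma Lg_cons (a : Int) (c : Char) (t : List Char) (i : Nat) :
    Lg a (c :: t) (i + 1) = Lg (if c = '<' then a + 1 else 0) t i := by
  induction i with
  | zero => simp [Lg]
  | succ i ih => simp only [Lg, List.getD_cons_succ] at *; rw [ih]

lemma sum_val_eq_Uf (t : List Char) (a : Int) (ha : 0 ≤ a) :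
    ((List.range (t.length + 1)).map
      (fun i => max (Lg a t i) (Gf (t.drop i)))).sum = Uf a t := by
  induction t generalizing a with
  | nil => simp [Lg, Gf, Uf]
  | cons c t' ih =>
    rw [List.length_cons, List.range_succ_eq_map]
    simp only [List.map_cons, List.map_map, List.sum_cons]
    have hterm : ((List.range (t'.length + 1)).map
          ((fun i => max (Lg a (c :: t') i) (Gf ((c :: t').drop i))) ∘ Nat.succ))
        = (List.range (t'.length + 1)).map
          (fun i => max (Lg (if c = '<' then a + 1 else 0) t' i) (Gf (t'.drop i))) := by
      apply List.map_congr_left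
      intro i _
      simp only [Function.comp_apply, Nat.succ_eq_add_one]
      rw [Lg_cons, List.drop_succ_cons]
    rw [hterm]
    rw [ih (if c = '<' then a + 1 else 0) (by split <;> omega)]
    simp [Uf, Lg]

lemma val_rec (s : List Char) (m : Nat) (hm : m < s.length) :
    valF s m = if s.getD m ' ' = '>' then max (Lg 0 s m) (valF s (m + 1) + 1)
               else Lg 0 s m := by
  have hget : s.getD m ' ' = s[m] := List.getD_eq_getElem s ' ' hm
  have hdrop : s.drop m = s[m] :: s.drop (m + 1) := List.drop_eq_getElem_cons hm
  unfold valF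
  rw [hdrop, hget]
  by_cases hc : s[m] = '>'
  · rw [if_pos hc]
    have hL : Lg 0 s (m + 1) = 0 := by
      simp only [Lg, hget, hc]
      rw [if_neg (by decide)]
    rw [hL]
    have := Gf_nonneg (s.drop (m + 1))
    simp only [Gf, if_pos hc]
    omega
  · rw [if_neg hc]
    simp only [Gf, if_neg hc]
    have := Lg_nonneg 0 s m le_rfl
    omega

lemma Tri_two (k : Nat) : 2 * Tri k = (k : Int) * ((k : Int) + 1) := by
  induction k with
  | zero => simp [Tri]
  | succ k ih => simp only [Tri]; push_cast; push_cast at ih; ring_nf; ring_nf at ih; omega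

lemma floordiv_tri (k : Nat) :
    PySem.Int.floordiv (((k : Int) + 1) * (((k : Int) + 1) + 1)) 2 = Tri (k + 1) := by
  have h2 := Tri_two (k + 1)
  push_cast at h2
  rw [PySem.Int.floordiv_eq_iff_of_pos (by omega)]
  omega

lemma Uf_shift (r : List Char) (a : Int) (ha : 0 ≤ a) (hh : r.head? ≠ some '<') :
    Uf a r = Uf 0 r + a - min a (Gf r) := by
  cases r with
  | nil => simp [Uf, Gf]; omega
  | cons c t =>
    simp only [List.head?] at hh
    have hc : c ≠ '<' := fun h => hh (by rw [h])
    have hg := Gf_nonneg (c :: t)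
    simp only [Uf, if_neg hc]
    have : max (0 : Int) (Gf (c :: t)) = Gf (c :: t) := by omega
    rw [this]
    have : max a (Gf (c :: t)) = a + Gf (c :: t) - min a (Gf (c :: t)) := by omega
    omega

lemma Gf_replicate_gt (k : Nat) (r : List Char) :
    Gf (List.replicate k '>' ++ r) = (k : Int) + Gf r := by
  induction k with
  | zero => simp
  | succ k ih => simp only [List.replicate_succ, List.cons_append, Gf, ih]; push_cast; ring

lemma Uf_replicate_lt (k : Nat) (r : List Char) (a : Int) (ha : 0 ≤ a) :
    Uf a (List.replicate k '<' ++ r) = (k : Int) * a + (Tri k - (k : Int)) + Uf (a + (k : Int)) r := by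
  induction k generalizing a with
  | zero => simp [Tri]
  | succ k ih =>
    simp only [List.replicate_succ, List.cons_append, Uf, Gf]
    simp only [if_true, show (('<' : Char) = '>') = False by decide, if_false]
    rw [max_eq_left ha, ih (a + 1) (by omega)]
    have harg : a + 1 + (k : Int) = a + ((k : Int) + 1) := by ring
    rw [harg]
    simp only [Tri]
    push_cast
    ring

lemma Uf_replicate_gt (k : Nat) (r : List Char) (hr : Gf r = 0) :
    Uf 0 (List.replicate k '>' ++ r) = Tri k + Uf 0 r := by
  induction k with
  | zero => simp [Tri]
  | succ k ih =>
    simp only [List.replicate_succ, List.cons_append, Uf, Gf]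
    simp only [if_true, show (('>' : Char) = '<') = False by decide, if_false]
    rw [Gf_replicate_gt, hr, ih, max_eq_right (by positivity)]
    simp only [Tri]
    ring

lemma Uf_replicate_other (k : Nat) (c : Char) (r : List Char) (h1 : c ≠ '<') (h2 : c ≠ '>') :
    Uf 0 (List.replicate k c ++ r) = Uf 0 r := by
  induction k with
  | zero => simp
  | succ k ih =>
    simp only [List.replicate_succ, List.cons_append, Uf, Gf]
    rw [if_neg h2, if_neg h1, ih]
    simp

lemma head?_dropWhile_ne (p : Char → Bool) (t : List Char) (x : Char)
    (hx : (t.dropWhile p).head? = some x) : p x = false := by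
  induction t with
  | nil => simp at hx
  | cons c t ih =>
    by_cases hc : p c
    · rw [List.dropWhile_cons_of_pos hc] at hx; exact ih hx
    · rw [List.dropWhile_cons_of_neg hc] at hx
      simp only [List.head?, Option.some_inj] at hx
      subst hx; simpa using hc

lemma solveRuns_spec_aux : ∀ (n : Nat) (r : List Char), r.length ≤ n →
    ∀ (prev : Option (Char × Int)) (total : Int),
    (∀ pc pl, prev = some (pc, pl) → 0 ≤ pl) →
    solveRuns prev total r = total + Uf 0 r -
      (match prev with
       | some (pc, pl) => if pc = '<' then min pl (Gf r) else 0
       | none => 0) := by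
  intro n
  induction n with
  | zero =>
    intro r hr prev total hprev
    have : r = [] := List.eq_nil_of_length_eq_zero (Nat.le_zero.mp hr)
    subst this
    cases prev with
    | none => simp [solveRuns, Uf]
    | some p =>
      obtain ⟨pc, pl⟩ := p
      have hpl := hprev pc pl rfl
      simp only [solveRuns, Uf, Gf]
      have : min pl 0 = 0 := by omega
      split <;> omega
  | succ n ihn =>
    intro r hr prev total hprev
    cases r with
    | nil =>
      cases prev with
      | none => simp [solveRuns, Uf]
      | some p =>
        obtain ⟨pc, pl⟩ := p
        have hpl := hprev pc pl rfl
        simp only [solveRuns, Uf, Gf]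
        have : min pl 0 = 0 := by omega
        split <;> omega
    | cons c t =>
      have hrl : t.length ≤ n := by
        simp only [List.length_cons] at hr; omega
      have hrep : t.takeWhile (fun x => x = c) = List.replicate ((t.takeWhile (fun x => x = c)).length) c := by
        rw [List.eq_replicate_iff]
        refine ⟨rfl, ?_⟩
        intro b hb
        have := List.mem_takeWhile_imp hb
        simpa using this
      have hsplit : c :: t = List.replicate ((t.takeWhile (fun x => x = c)).length + 1) c
          ++ t.dropWhile (fun x => x = c) := by
        rw [List.replicate_succ, List.cons_append, ← hrep, List.takeWhile_append_dropWhile]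
      have hrestlen : (t.dropWhile (fun x => x = c)).length ≤ n :=
        le_trans (List.length_dropWhile_le _ _) hrl
      have hheadne : ∀ x, (t.dropWhile (fun x => x = c)).head? = some x → x ≠ c := by
        intro x hx heq
        have := head?_dropWhile_ne _ t x hx
        subst heq
        simp at this
      rw [solveRuns.eq_def]
      simp only []
      by_cases hc : c = '<'
      · subst hc
        rw [if_pos rfl]
        rw [ihn _ hrestlen (some ('<', ((t.takeWhile (fun x => x = '<')).length : Int) + 1)) _
          (by intro pc pl h; injection h with h'; injection h' with h1 h2; omega)]
        have hshead : (t.dropWhile (fun x => x = '<')).head? ≠ some '<' := by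
          intro h; exact hheadne _ h rfl
        have hUf : Uf 0 ('<' :: t) = Tri ((t.takeWhile (fun x => x = '<')).length + 1)
            + Uf 0 (t.dropWhile (fun x => x = '<'))
            - min (((t.takeWhile (fun x => x = '<')).length : Int) + 1) (Gf (t.dropWhile (fun x => x = '<'))) := by
          rw [hsplit, Uf_replicate_lt _ _ 0 le_rfl,
              Uf_shift _ _ (by positivity) hshead]
          push_cast
          ring
        have hGf : Gf ('<' :: t) = 0 := by
          simp only [Gf]
          rw [if_neg (by decide)]
        rw [floordiv_tri, hUf, hGf]
        cases prev with
        | none => push_cast; ring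
        | some p =>
          obtain ⟨pc, pl⟩ := p
          have hpl := hprev pc pl rfl
          have : min pl 0 = 0 := by omega
          push_cast
          split <;> omega
      · by_cases hc2 : c = '>'
        · subst hc2
          rw [if_neg hc, if_pos rfl]
          rw [ihn _ hrestlen (some ('>', ((t.takeWhile (fun x => x = '>')).length : Int) + 1)) _
            (by intro pc pl h; injection h with h'; injection h' with h1 h2; omega)]
          have hgrest : Gf (t.dropWhile (fun x => x = '>')) = 0 := by
            apply Gf_eq_zero_of_head
            intro h; exact hheadne _ h rfl
          have hUf : Uf 0 ('>' :: t) = Tri ((t.takeWhile (fun x => x = '>')).length + 1)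
              + Uf 0 (t.dropWhile (fun x => x = '>')) := by
            rw [hsplit, Uf_replicate_gt _ _ hgrest]
          have hGf : Gf ('>' :: t) = ((t.takeWhile (fun x => x = '>')).length : Int) + 1 := by
            rw [hsplit, Gf_replicate_gt, hgrest]
            push_cast
            ring
          rw [floordiv_tri, hUf, hGf]
          cases prev with
          | none => push_cast; ring
          | some p =>
            obtain ⟨pc, pl⟩ := p
            have hpl := hprev pc pl rfl
            push_cast
            split <;> omega
        · rw [if_neg hc, if_neg hc2]
          rw [ihn _ hrestlen (some (c, ((t.takeWhile (fun x => x = c)).length : Int) + 1)) _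
            (by intro pc pl h; injection h with h'; injection h' with h1 h2; omega)]
          have hUf : Uf 0 (c :: t) = Uf 0 (t.dropWhile (fun x => x = c)) := by
            rw [hsplit, Uf_replicate_other _ _ _ hc hc2]
          have hGf : Gf (c :: t) = 0 := by
            simp only [Gf]
            rw [if_neg hc2]
          dsimp only
          rw [if_neg hc, hUf, hGf]
          cases prev with
          | none => simp
          | some p =>
            obtain ⟨pc, pl⟩ := p
            have hpl := hprev pc pl rfl
            have hmin : min pl 0 = 0 := by omega
            simp [hmin]

lemma solveRuns_spec (r : List Char) : ∀ (prev : Option (Char × Int)) (total : Int),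
    (∀ pc pl, prev = some (pc, pl) → 0 ≤ pl) →
    solveRuns prev total r = total + Uf 0 r -
      (match prev with
       | some (pc, pl) => if pc = '<' then min pl (Gf r) else 0
       | none => 0) :=
  solveRuns_spec_aux r.length r le_rfl

lemma set_append_len {α : Type} (l₁ l₂ : List α) (v : α) :
    (l₁ ++ l₂).set l₁.length v = l₁ ++ l₂.set 0 v := by
  induction l₁ with
  | nil => rfl
  | cons x l ih => simp [ih]

lemma loop1 (s : List Char) (k : Nat) (hk : k ≤ s.length) :
    (PySem.List.pyRange 1 ((k : Int) + 1) 1).foldl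
      (fun a i =>
        if PySem.List.pyGet? s (i - 1) = some '<' then
          PySem.List.pySetD a i (PySem.List.pyGetD a (i - 1) 0 + 1)
        else a) (List.replicate (s.length + 1) 0)
    = (List.range (k + 1)).map (Lg 0 s) ++ List.replicate (s.length - k) 0 := by
  induction k with
  | zero =>
    rw [show ((0 : Nat) : Int) + 1 = 1 by norm_num, PySem.List.pyRange_one_eq_nil le_rfl]
    simp [Lg, List.replicate_succ]
  | succ k ih =>
    have hk' : k ≤ s.length := by omega
    have hkl : k < s.length := by omega
    rw [show (((k + 1 : Nat)) : Int) + 1 = ((k : Int) + 1) + 1 by push_cast; ring,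
        PySem.List.pyRange_one_succ_right (by omega), List.foldl_append, ih hk',
        List.foldl_cons, List.foldl_nil]
    have h1 : ((k : Int) + 1) - 1 = (k : Int) := by ring
    have hlen : ((List.range (k + 1)).map (Lg 0 s)).length = k + 1 := by simp
    have hbk : PySem.List.pyGetD
        ((List.range (k + 1)).map (Lg 0 s) ++ List.replicate (s.length - k) 0) ((k : Int)) 0
        = Lg 0 s k := by
      rw [PySem.List.pyGetD_natCast, List.getD_eq_getElem _ _ (by simp; omega),
          List.getElem_append_left (by omega)]
      simp
    have hset : ∀ v : Int,
        PySem.List.pySetD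
          ((List.range (k + 1)).map (Lg 0 s) ++ List.replicate (s.length - k) 0) ((k : Int) + 1) v
        = (List.range (k + 1)).map (Lg 0 s) ++ (List.replicate (s.length - k) 0).set 0 v := by
      intro v
      rw [show ((k : Int) + 1) = ((k + 1 : Nat) : Int) by push_cast; ring,
          PySem.List.pySetD_natCast]
      have hs := set_append_len ((List.range (k + 1)).map (Lg 0 s))
        (List.replicate (s.length - k) 0) v
      rw [hlen] at hs
      exact hs
    have hrep : List.replicate (s.length - k) (0 : Int) = 0 :: List.replicate (s.length - k - 1) 0 := by
      conv_lhs => rw [show s.length - k = (s.length - k - 1) + 1 by omega]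
      rw [List.replicate_succ]
    have hmap : (List.range (k + 1 + 1)).map (Lg 0 s)
        = (List.range (k + 1)).map (Lg 0 s) ++ [Lg 0 s (k + 1)] := by
      rw [List.range_succ, List.map_append, List.map_singleton]
    have hLg : Lg 0 s (k + 1) = if s.getD k ' ' = '<' then Lg 0 s k + 1 else 0 := rfl
    have hgd : s.getD k ' ' = s[k] := List.getD_eq_getElem s ' ' hkl
    rw [h1, PySem.List.pyGet?_natCast, List.getElem?_eq_getElem hkl]
    by_cases hc : s[k] = '<'
    · rw [if_pos (by rw [hc]), hbk, hset, hrep, hmap, hLg, hgd, if_pos hc,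
          show s.length - (k + 1) = s.length - k - 1 by omega, List.append_cons]
      simp
    · rw [if_neg (by intro h; exact hc (Option.some_inj.mp h)), hmap, hLg, hgd, if_neg hc, hrep,
          show s.length - (k + 1) = s.length - k - 1 by omega, List.append_cons]

lemma loop2 (s : List Char) (m : Nat) (hm : m ≤ s.length) :
    ((PySem.List.pyRange 0 (m : Int) 1).reverse).foldl
      (fun a i =>
        if PySem.List.pyGet? s i = some '>' then
          PySem.List.pySetD a i (max (PySem.List.pyGetD a i 0) (PySem.List.pyGetD a (i + 1) 0 + 1))
        else a)
      ((List.range m).map (Lg 0 s) ++ (List.range' m (s.length + 1 - m)).map (valF s))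
    = (List.range (s.length + 1)).map (valF s) := by
  induction m with
  | zero =>
    rw [show ((0 : Nat) : Int) = 0 by norm_num, PySem.List.pyRange_one_eq_nil le_rfl]
    simp [List.range_eq_range']
  | succ m ih =>
    have hm' : m ≤ s.length := by omega
    have hml : m < s.length := by omega
    rw [show (((m + 1 : Nat)) : Int) = (m : Int) + 1 by push_cast; ring,
        PySem.List.pyRange_one_succ_right (by omega), List.reverse_append,
        List.reverse_singleton, List.singleton_append, List.foldl_cons]
    have hlenL : ((List.range (m + 1)).map (Lg 0 s)).length = m + 1 := by simp
    have hrange' : List.range' m (s.length + 1 - m) = m :: List.range' (m + 1) (s.length - m) := by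
      conv_lhs => rw [show s.length + 1 - m = (s.length - m) + 1 by omega]
      rw [List.range'_succ]
    have hrange2 : List.range' (m + 1) (s.length - m)
        = (m + 1) :: List.range' (m + 2) (s.length - m - 1) := by
      conv_lhs => rw [show s.length - m = (s.length - m - 1) + 1 by omega]
      rw [List.range'_succ]
    have hstate : (List.range (m + 1)).map (Lg 0 s)
          ++ (List.range' (m + 1) (s.length + 1 - (m + 1))).map (valF s)
        = (List.range (m + 1)).map (Lg 0 s)
          ++ (List.range' (m + 1) (s.length - m)).map (valF s) := by
      rw [show s.length + 1 - (m + 1) = s.length - m by omega]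
    rw [hstate]
    have hbm : PySem.List.pyGetD
        ((List.range (m + 1)).map (Lg 0 s) ++ (List.range' (m + 1) (s.length - m)).map (valF s))
        ((m : Int)) 0 = Lg 0 s m := by
      rw [PySem.List.pyGetD_natCast, List.getD_eq_getElem _ _ (by simp; omega),
          List.getElem_append_left (by omega)]
      simp
    have hbm1 : PySem.List.pyGetD
        ((List.range (m + 1)).map (Lg 0 s) ++ (List.range' (m + 1) (s.length - m)).map (valF s))
        ((m : Int) + 1) 0 = valF s (m + 1) := by
      rw [show ((m : Int) + 1) = ((m + 1 : Nat) : Int) by push_cast; ring,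
          PySem.List.pyGetD_natCast, List.getD_eq_getElem _ _ (by simp; omega)]
      rw [List.getElem_append_right (by omega)]
      simp [hrange2]
    have hmapL : (List.range (m + 1)).map (Lg 0 s)
        = (List.range m).map (Lg 0 s) ++ [Lg 0 s m] := by
      rw [List.range_succ, List.map_append, List.map_singleton]
    have hgd : s.getD m ' ' = s[m] := List.getD_eq_getElem s ' ' hml
    have hvr := val_rec s m hml
    rw [PySem.List.pyGet?_natCast, List.getElem?_eq_getElem hml]
    by_cases hc : s[m] = '>'
    · rw [if_pos (by rw [hc]), hbm, hbm1]
      have hset : PySem.List.pySetD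
          ((List.range (m + 1)).map (Lg 0 s) ++ (List.range' (m + 1) (s.length - m)).map (valF s))
          ((m : Int)) (max (Lg 0 s m) (valF s (m + 1) + 1))
          = (List.range m).map (Lg 0 s)
            ++ (List.range' m (s.length + 1 - m)).map (valF s) := by
        rw [PySem.List.pySetD_natCast, hmapL, List.append_assoc]
        have hs := set_append_len ((List.range m).map (Lg 0 s))
          ([Lg 0 s m] ++ (List.range' (m + 1) (s.length - m)).map (valF s))
          (max (Lg 0 s m) (valF s (m + 1) + 1))
        rw [show ((List.range m).map (Lg 0 s)).length = m by simp] at hs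
        rw [hs, hrange', List.map_cons]
        have hv : valF s m = max (Lg 0 s m) (valF s (m + 1) + 1) := by
          rw [hvr, if_pos (by rw [hgd, hc])]
        rw [← hv]
        rfl
      rw [hset, ih hm']
    · rw [if_neg (by intro h; exact hc (Option.some_inj.mp h))]
      have : (List.range (m + 1)).map (Lg 0 s)
            ++ (List.range' (m + 1) (s.length - m)).map (valF s)
          = (List.range m).map (Lg 0 s)
            ++ (List.range' m (s.length + 1 - m)).map (valF s) := by
        rw [hmapL, hrange', List.map_cons, List.append_assoc]
        have : valF s m = Lg 0 s m := by
          rw [hvr, if_neg (by rw [hgd]; exact hc)]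
        rw [this]
        rfl
      rw [this, ih hm']

lemma solve_eq_Uf (S : String) : solve S = Uf 0 S.toList := by
  have h1 := loop1 S.toList S.toList.length le_rfl
  have h2 := loop2 S.toList S.toList.length le_rfl
  have hval : valF S.toList S.toList.length = Lg 0 S.toList S.toList.length := by
    unfold valF
    rw [List.drop_length]
    have := Lg_nonneg 0 S.toList S.toList.length le_rfl
    simp only [Gf]
    omega
  have hinit : (List.range (S.toList.length + 1)).map (Lg 0 S.toList)
      = (List.range S.toList.length).map (Lg 0 S.toList)
        ++ (List.range' S.toList.length (S.toList.length + 1 - S.toList.length)).map (valF S.toList) := by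
    rw [show S.toList.length + 1 - S.toList.length = 1 by omega,
        List.range_succ, List.map_append, List.map_singleton,
        show List.range' S.toList.length 1 = [S.toList.length] from rfl,
        List.map_singleton, hval]
  simp only [solve]
  rw [show (S.toList.length : Int) + 1 - 1 = (S.toList.length : Int) by ring]
  rw [h1, Nat.sub_self, List.replicate_zero, List.append_nil, hinit, h2]
  exact sum_val_eq_Uf S.toList 0 le_rfl

lemma solve_alt_eq_Uf (S : String) : solve_alt S = Uf 0 S.toList := by
  have h := solveRuns_spec S.toList none 0 (by intro pc pl h; cases h)
  simpa [solve_alt] using h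

-- ===== VERDICT (by name: the statement is the Claim_ definition above) =====
theorem solve_spec : Claim_equal_solve := by
  intro S _
  show solve S = solve_alt S
  rw [solve_eq_Uf, solve_alt_eq_Uf]
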